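-- pv_equiv track=rewrite | github.com/sungguenja/other_Algorithmus_problem | kakao_0801_4.py | prison
-- ===== SOURCE A (Python) =====
-- def prison(n, m, h, v):
--     # Write your code here
--     h.sort()
--     v.sort()
--     if len(h) != 1:
--         maxmum_vertical = 1
--         cnt = 2
--         for i in range(1,len(h)):
--             if h[i-1] + 1 == h[i]:
--                 cnt += 1
--             else:
--                 if maxmum_vertical<cnt:
--                     maxmum_vertical = cnt
--                 cnt = 2
--         if maxmum_vertical<cnt:
--             maxmum_vertical = cnt
--     else:
--         maxmum_vertical = 2
--
--     if len(v)!=1: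
--         cnt = 2
--         maxmum_horizon = 1
--         for j in range(1,len(v)):
--             if v[j-1] + 1 == v[j]:
--                 cnt += 1
--             else:
--                 if maxmum_horizon<cnt:
--                     maxmum_horizon = cnt
--                 cnt = 2
--         if maxmum_horizon<cnt:
--             maxmum_horizon = cnt
--     else:
--         maxmum_horizon = 2
--     return maxmum_horizon*maxmum_vertical
-- ===== SOURCE B (Python) =====
-- def prison(n, m, h, v):
--     # Like A, sorts h and v in place; equivalence is about the return value.
--     h.sort()
--     v.sort()
--
--     def best(xs):
--         # Boundary-index method: collect the indices where a maximal
--         # consecutive (step-1) run starts in the sorted list, close with the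
--         # list length, and read run lengths off as gaps between boundaries.
--         bounds = [i for i in range(len(xs)) if i == 0 or xs[i] != xs[i - 1] + 1]
--         bounds.append(len(xs))
--         return max((b - a for a, b in zip(bounds, bounds[1:])), default=1) + 1
--
--     return best(v) * best(h)
-- ===== Notes on version B (the rewrite author's own statement) =====
-- stated objective: alternative
-- what changed: Instead of A's single pass holding a running counter (cnt starting at 2) and a running maximum with a separate len==1 branch, B computes for each sorted list the list of run-boundary indices (positions where a maximal step-1 run starts, closed by the list length) and reads the answer off as the maximum gap between adjacent boundaries plus one, with no special cases.
import Mathlib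
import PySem

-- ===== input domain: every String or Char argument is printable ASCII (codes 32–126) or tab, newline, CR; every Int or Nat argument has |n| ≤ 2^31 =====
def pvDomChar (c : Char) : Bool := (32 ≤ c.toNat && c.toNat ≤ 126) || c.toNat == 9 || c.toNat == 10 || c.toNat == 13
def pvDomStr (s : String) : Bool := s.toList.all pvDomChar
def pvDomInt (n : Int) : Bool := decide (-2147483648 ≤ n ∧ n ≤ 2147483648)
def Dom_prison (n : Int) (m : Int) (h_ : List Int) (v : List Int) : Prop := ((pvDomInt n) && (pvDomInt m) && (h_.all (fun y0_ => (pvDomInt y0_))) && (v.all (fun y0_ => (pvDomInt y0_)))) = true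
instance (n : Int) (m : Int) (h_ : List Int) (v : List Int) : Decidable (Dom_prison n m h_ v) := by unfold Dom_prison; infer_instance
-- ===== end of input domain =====

-- B replaces A's running-counter/running-max scan (with its separate len==1 branch) by a
-- boundary-index method: collect the indices where a maximal step-1 run starts, close the list
-- with len(xs), and take the maximum gap between adjacent boundaries plus one (alternative
-- decomposition, same cost; both programs sort their list arguments in place in Python —
-- the claim is about the return value).


-- ===== PORT A =====
-- one `if len != 1 … for i in range(1, len) … else` block of A (used for h and for v,
-- whose code in A is identical); indices i-1, i are always in range, so pyGetD's default is never read
def prisonBlockA (xs : List Int) : Int :=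
  if xs.length ≠ 1 then
    let st := (PySem.List.pyRange 1 (xs.length : Int) 1).foldl
      (fun (st : Int × Int) i =>
        if PySem.List.pyGetD xs (i - 1) 0 + 1 = PySem.List.pyGetD xs i 0 then
          (st.1, st.2 + 1)
        else
          ((if st.1 < st.2 then st.2 else st.1), 2))
      (1, 2)
    if st.1 < st.2 then st.2 else st.1
  else 2

def prison (n : Int) (m : Int) (h_ : List Int) (v : List Int) : Int :=
  let h := PySem.List.sorted h_ (fun x => x) false
  let v' := PySem.List.sorted v (fun x => x) false
  prisonBlockA v' * prisonBlockA h

-- ===== PORT B =====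
-- Source B's best(xs): run-boundary indices (comprehension over range(len(xs))), closed with len(xs)
def prisonBoundsB (xs : List Int) : List Int :=
  ((PySem.List.pyRange 0 (xs.length : Int) 1).filter
    (fun i => i == 0 || !(PySem.List.pyGetD xs i 0 == PySem.List.pyGetD xs (i - 1) 0 + 1)))
  ++ [(xs.length : Int)]

-- max(gaps, default=1) + 1 over the gaps between adjacent boundaries
def prisonBestB (xs : List Int) : Int :=
  PySem.List.maxD
    (((prisonBoundsB xs).zip (PySem.List.slice (prisonBoundsB xs) (some 1) none)).map
      (fun p => p.2 - p.1))
    (fun x => x) 1 + 1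

def prison_alt (n : Int) (m : Int) (h_ : List Int) (v : List Int) : Int :=
  let h := PySem.List.sorted h_ (fun x => x) false
  let v' := PySem.List.sorted v (fun x => x) false
  prisonBestB v' * prisonBestB h

-- ===== PRECONDITION & SPEC =====
def Spec_prison (n : Int) (m : Int) (h_ : List Int) (v : List Int) (out : Int) : Prop := out = prison_alt n m h_ v
instance (n : Int) (m : Int) (h_ : List Int) (v : List Int) (out : Int) : Decidable (Spec_prison n m h_ v out) := by unfold Spec_prison; infer_instance

-- ===== CLAIM (what is proved, stated in full; the proofs are below) =====
def Claim_equal_prison : Prop := ∀ (n : Int) (m : Int) (h_ : List Int) (v : List Int), Dom_prison n m h_ v → Spec_prison n m h_ v (prison n m h_ v)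

-- ===== LEMMAS AND PROOFS =====

-- the common specification: g r ps = final per-list value when the current run already
-- covers r elements and ps are the remaining adjacent pairs
def gRun (r : Int) : List (Int × Int) → Int
  | [] => r + 1
  | p :: t => if p.1 + 1 = p.2 then gRun (r + 1) t else max (r + 1) (gRun 1 t)

theorem gRun_ge (ps : List (Int × Int)) : ∀ r : Int, r + 1 ≤ gRun r ps := by
  induction ps with
  | nil => intro r; simp [gRun]
  | cons p t ih =>
    intro r
    simp only [gRun]
    split
    · exact le_trans (by omega) (ih (r + 1))
    · exact le_max_left _ _

-- adjacent pairs of xs as a map over range(1, len(xs))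
theorem map_range_pairs (xs : List Int) :
    (PySem.List.pyRange 1 (xs.length : Int) 1).map
      (fun i => (PySem.List.pyGetD xs (i - 1) 0, PySem.List.pyGetD xs i 0))
      = xs.zip xs.tail := by
  rw [PySem.List.pyRange_one, List.map_map]
  apply List.ext_getElem
  · simp [List.length_zip]
  · intro k hk1 hk2
    simp only [List.length_map, List.length_range] at hk1
    have hk : k + 1 < xs.length := by omega
    have ht : k < xs.tail.length := by simp [List.length_tail]; omega
    simp only [List.getElem_map, List.getElem_range, Function.comp]
    have h1 : (1 : Int) + (k : Nat) - 1 = ((k : Nat) : Int) := by omega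
    have h2 : (1 : Int) + (k : Nat) = (((k + 1 : Nat)) : Int) := by push_cast; omega
    rw [h1, h2, PySem.List.pyGetD_natCast, PySem.List.pyGetD_natCast, List.getElem_zip]
    refine Prod.ext ?_ ?_
    · simp [List.getD_eq_getElem?_getD, List.getElem?_eq_getElem (by omega : k < xs.length)]
    · simp [List.getD_eq_getElem?_getD, List.getElem?_eq_getElem hk, List.getElem_tail]

-- A's index loop is a fold over the adjacent pairs
theorem foldl_range_pairs {β : Type} (xs : List Int) (f : β → Int × Int → β) (init : β) :
    (PySem.List.pyRange 1 (xs.length : Int) 1).foldl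
      (fun st i => f st (PySem.List.pyGetD xs (i - 1) 0, PySem.List.pyGetD xs i 0)) init
      = (xs.zip xs.tail).foldl f init := by
  rw [← map_range_pairs xs, List.foldl_map]

-- A's loop computes max maxv (gRun (cnt-1) ps)
theorem foldA_eq_gRun (ps : List (Int × Int)) : ∀ maxv cnt : Int,
    (let st := ps.foldl
      (fun (st : Int × Int) p =>
        if p.1 + 1 = p.2 then (st.1, st.2 + 1)
        else ((if st.1 < st.2 then st.2 else st.1), 2)) (maxv, cnt)
     if st.1 < st.2 then st.2 else st.1) = max maxv (gRun (cnt - 1) ps) := by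
  induction ps with
  | nil =>
    intro maxv cnt
    simp only [List.foldl_nil, gRun]
    omega
  | cons p t ih =>
    intro maxv cnt
    simp only [List.foldl_cons, gRun]
    split
    · rw [ih maxv (cnt + 1), (by ring : cnt + 1 - 1 = cnt - 1 + 1)]
    · rw [ih (if maxv < cnt then cnt else maxv) 2]
      rw [(by norm_num : (2 : Int) - 1 = 1)]
      omega

theorem blockA_eq_gRun (xs : List Int) :
    prisonBlockA xs = gRun 1 (xs.zip xs.tail) := by
  unfold prisonBlockA
  by_cases hl : xs.length = 1
  · obtain ⟨a, rfl⟩ : ∃ a, xs = [a] := by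
      match xs, hl with
      | [a], _ => exact ⟨a, rfl⟩
    simp [gRun]
  · rw [if_pos hl]
    have := foldl_range_pairs xs
      (fun (st : Int × Int) p =>
        if p.1 + 1 = p.2 then (st.1, st.2 + 1)
        else ((if st.1 < st.2 then st.2 else st.1), 2)) ((1 : Int), (2 : Int))
    simp only at this ⊢
    rw [this, foldA_eq_gRun (xs.zip xs.tail) 1 2, (by norm_num : (2 : Int) - 1 = 1)]
    have := gRun_ge (xs.zip xs.tail) 1
    omega

-- ---- B side ----

-- the run lengths of the sorted list, read off the adjacent pairs
def runLens (r : Int) : List (Int × Int) → List Int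
  | [] => [r]
  | p :: t => if p.1 + 1 = p.2 then runLens (r + 1) t else r :: runLens (1 : Int) t

theorem runLens_one_shape (ps : List (Int × Int)) :
    ∃ hd tl, runLens 1 ps = hd :: tl ∧ ∀ r : Int, runLens r ps = (hd + (r - 1)) :: tl := by
  induction ps with
  | nil =>
    exact ⟨1, [], rfl, fun r => by simp only [runLens]; congr 1; omega⟩
  | cons p t ih =>
    obtain ⟨hd, tl, h1, h2⟩ := ih
    by_cases hc : p.1 + 1 = p.2
    · refine ⟨hd + 1, tl, ?_, ?_⟩
      · simp only [runLens, if_pos hc]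
        rw [show (1 : Int) + 1 = 2 by norm_num, h2 2]
        norm_num
      · intro r
        simp only [runLens, if_pos hc, h2 (r + 1)]
        congr 1; omega
    · refine ⟨1, runLens 1 t, ?_, ?_⟩
      · simp [runLens, hc]
      · intro r
        simp only [runLens, if_neg hc]
        congr 1; omega

theorem foldl_max_pull (l : List Int) : ∀ a b : Int, l.foldl max (max a b) = max a (l.foldl max b) := by
  induction l with
  | nil => intro a b; simp
  | cons c t ih =>
    intro a b
    simp only [List.foldl_cons]
    rw [max_assoc, ih]

-- max of the run lengths is gRun minus one
theorem runLens_max_eq_gRun (ps : List (Int × Int)) : ∀ r : Int,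
    ∃ hd tl, runLens r ps = hd :: tl ∧ tl.foldl max hd = gRun r ps - 1 := by
  induction ps with
  | nil => exact fun r => ⟨r, [], rfl, by simp [gRun]⟩
  | cons p t ih =>
    intro r
    by_cases hc : p.1 + 1 = p.2
    · simp only [runLens, gRun, if_pos hc]
      exact ih (r + 1)
    · obtain ⟨hd, tl, h1, h2⟩ := ih 1
      refine ⟨r, hd :: tl, by simp [runLens, hc, h1], ?_⟩
      simp only [List.foldl_cons, gRun, if_neg hc]
      rw [foldl_max_pull tl r hd, h2]
      omega

-- gaps between adjacent entries of a boundary list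
def diffs (l : List Int) : List Int := (l.zip l.tail).map (fun p => p.2 - p.1)

theorem diffs_cons (x y : Int) (t : List Int) :
    diffs (x :: y :: t) = (y - x) :: diffs (y :: t) := rfl

theorem diffs_map_add_one (l : List Int) : diffs (l.map (fun z => z + 1)) = diffs l := by
  induction l with
  | nil => rfl
  | cons x t ih =>
    cases t with
    | nil => rfl
    | cons y t' =>
      simp only [List.map_cons] at ih ⊢
      rw [diffs_cons, diffs_cons, ih]
      congr 1
      ring

-- Nat-level predicate for "index i starts a run" and the Nat-level boundary list
def runStart (xs : List Int) (i : Nat) : Bool :=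
  i == 0 || !(xs.getD i 0 == xs.getD (i - 1) 0 + 1)

def boundsN (xs : List Int) : List Int :=
  List.map (fun k : Nat => (k : Int)) ((List.range xs.length).filter (runStart xs)) ++ [(xs.length : Int)]

-- the port's boundary list is boundsN
theorem boundsB_eq_boundsN (xs : List Int) : prisonBoundsB xs = boundsN xs := by
  unfold prisonBoundsB boundsN
  rw [PySem.List.pyRange_zero_natCast, List.filter_map]
  congr 1
  congr 1
  apply List.filter_congr
  intro k _
  simp only [Function.comp_apply]
  by_cases hk0 : k = 0
  · subst hk0; simp [runStart]
  · have h1 : ((k : Nat) : Int) - 1 = ((k - 1 : Nat) : Int) := by omega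
    have h2 : (((k : Nat) : Int) == 0) = false := by simp [hk0]
    have h3 : ((k : Nat) == 0) = false := by simp [hk0]
    simp only [runStart, h1, h2, h3, PySem.List.pyGetD_natCast, Bool.false_or]

-- one unfolding step of boundsN on a cons
theorem runStart_shift (a b : Int) (t : List Int) :
    ∀ j ∈ List.range t.length,
      ((runStart (a :: b :: t) ∘ Nat.succ) ∘ Nat.succ) j = (runStart (b :: t) ∘ Nat.succ) j := by
  intro j _
  simp [runStart]

theorem boundsN_cons (a : Int) (rest : List Int) (hne : rest ≠ []) :
    boundsN (a :: rest) =
      0 :: ((if (rest.getD 0 0 == a + 1) = true then [] else [(0 : Int)])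
            ++ (boundsN rest).tail).map (fun z => z + 1) := by
  obtain ⟨b, t, rfl⟩ : ∃ b t, rest = b :: t := by
    cases rest with
    | nil => exact absurd rfl hne
    | cons b t => exact ⟨b, t, rfl⟩
  have hmapmap : ∀ L : List Nat, List.map (fun k : Nat => (k : Int)) (L.map Nat.succ)
      = List.map (fun z : Int => z + 1) (List.map (fun k : Nat => (k : Int)) L) := by
    intro L
    simp only [List.map_map]
    apply List.map_congr_left
    intro x _
    simp [Nat.succ_eq_add_one]
  have hstart0 : ∀ xs : List Int, runStart xs 0 = true := by intro xs; simp [runStart]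
  have hstart1 : runStart (a :: b :: t) 1 = !(b == a + 1) := by simp [runStart]
  have hcast : ((t.length + 1 + 1 : Nat) : Int) = ((t.length + 1 : Nat) : Int) + 1 := by push_cast; ring
  -- B side tail
  have hBtail : (boundsN (b :: t)).tail =
      List.map (fun k : Nat => (k : Int)) (((List.range t.length).filter (runStart (b :: t) ∘ Nat.succ)).map Nat.succ)
        ++ [((t.length + 1 : Nat) : Int)] := by
    rw [boundsN]
    simp only [List.length_cons]
    rw [List.range_succ_eq_map, List.filter_cons_of_pos (hstart0 (b :: t)), List.filter_map,
        List.map_cons, List.cons_append, List.tail_cons]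
  -- A side
  rw [boundsN]
  simp only [List.length_cons]
  rw [List.range_succ_eq_map, List.filter_cons_of_pos (hstart0 (a :: b :: t)), List.filter_map,
      List.range_succ_eq_map]
  by_cases hc : ((b :: t).getD 0 0 == a + 1) = true
  · have h1 : ¬ ((runStart (a :: b :: t) ∘ Nat.succ) 0 = true) := by
      simp only [Function.comp_apply, Nat.succ_eq_add_one, Nat.zero_add, hstart1]
      simp only [List.getD_cons_zero] at hc
      simp [hc]
    rw [List.filter_cons_of_neg h1, List.filter_map,
        List.filter_congr (runStart_shift a b t), if_pos hc, List.nil_append, hBtail]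
    rw [List.map_cons, List.cons_append, hmapmap (((List.range t.length).filter (runStart (b :: t) ∘ Nat.succ)).map Nat.succ)]
    rw [List.map_append, hcast, Nat.cast_zero]
    rfl
  · have h1 : (runStart (a :: b :: t) ∘ Nat.succ) 0 = true := by
      simp only [Function.comp_apply, Nat.succ_eq_add_one, Nat.zero_add, hstart1]
      simp only [List.getD_cons_zero] at hc
      simp [hc]
    rw [List.filter_cons_of_pos h1, List.filter_map,
        List.filter_congr (runStart_shift a b t), if_neg hc, hBtail]
    simp only [List.map_cons, List.cons_append, List.nil_append, List.map_append, List.map_nil,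
      hmapmap, hcast, Nat.cast_zero, zero_add]
    norm_num

-- diffs of the boundary list are the run lengths
theorem diffs_boundsN (xs : List Int) (h : xs ≠ []) :
    ∃ u T, boundsN xs = 0 :: u :: T ∧ diffs (0 :: u :: T) = runLens 1 (xs.zip xs.tail) := by
  induction xs with
  | nil => exact absurd rfl h
  | cons a rest ih =>
    cases rest with
    | nil =>
      refine ⟨1, [], ?_, ?_⟩
      · simp [boundsN, runStart, List.range_succ]
      · simp [diffs, runLens]
    | cons b t =>
      obtain ⟨u, T, hB, hD⟩ := ih (by simp)
      rw [boundsN_cons a (b :: t) (by simp), hB]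
      have hps : (a :: b :: t).zip (a :: b :: t).tail = (a, b) :: ((b :: t).zip (b :: t).tail) := rfl
      have hD' : runLens 1 ((b :: t).zip (b :: t).tail) = u :: diffs (u :: T) := by
        rw [← hD, diffs_cons]; congr 1; omega
      by_cases hc : ((b :: t).getD 0 0 == a + 1) = true
      · have hab : a + 1 = b := by
          simp only [List.getD_cons_zero, beq_iff_eq] at hc; omega
        simp only [if_pos hc, List.nil_append]
        refine ⟨u + 1, T.map (fun z => z + 1), rfl, ?_⟩
        obtain ⟨hd, tl, e1, e2⟩ := runLens_one_shape ((b :: t).zip (b :: t).tail)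
        have hu : hd = u ∧ tl = diffs (u :: T) := by
          rw [e1] at hD'; exact ⟨(List.cons.injEq _ _ _ _).mp hD' |>.1, (List.cons.injEq _ _ _ _).mp hD' |>.2⟩
        rw [hps]
        simp only [runLens, if_pos hab]
        rw [show (1 : Int) + 1 = 2 by norm_num, e2 2, hu.1, hu.2, diffs_cons]
        have : diffs ((u + 1) :: T.map (fun z => z + 1)) = diffs (u :: T) := by
          have := diffs_map_add_one (u :: T)
          simpa using this
        rw [this]
        congr 1
        omega
      · have hab : ¬ (a + 1 = b) := by
          simp only [List.getD_cons_zero, beq_iff_eq] at hc; omega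
        simp only [if_neg hc, List.cons_append, List.nil_append, List.map_cons]
        refine ⟨1, (u + 1) :: T.map (fun z => z + 1), rfl, ?_⟩
        rw [hps]
        simp only [runLens, if_neg hab]
        rw [diffs_cons, diffs_cons]
        have : diffs ((u + 1) :: T.map (fun z => z + 1)) = diffs (u :: T) := by
          have := diffs_map_add_one (u :: T)
          simpa using this
        rw [this, hD']
        norm_num

theorem bestB_eq_gRun (xs : List Int) : prisonBestB xs = gRun 1 (xs.zip xs.tail) := by
  cases xs with
  | nil => decide
  | cons a rest =>
    obtain ⟨u, T, hB, hD⟩ := diffs_boundsN (a :: rest) (by simp)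
    unfold prisonBestB
    rw [PySem.List.slice_from_one, boundsB_eq_boundsN]
    have hdiffs : ((boundsN (a :: rest)).zip (boundsN (a :: rest)).tail).map
        (fun p => p.2 - p.1) = diffs (boundsN (a :: rest)) := rfl
    rw [hdiffs, hB, hD]
    obtain ⟨hd, tl, e1, e2⟩ := runLens_max_eq_gRun ((a :: rest).zip (a :: rest).tail) 1
    rw [e1]
    simp only [PySem.List.maxD, PySem.List.max?_id_cons, Option.getD_some]
    omega

theorem block_eq_best (xs : List Int) : prisonBlockA xs = prisonBestB xs := by
  rw [blockA_eq_gRun, bestB_eq_gRun]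

-- ===== VERDICT (by name: the statement is the Claim_ definition above) =====
theorem prison_spec : Claim_equal_prison := by
  intro n m h_ v _
  unfold Spec_prison prison prison_alt
  simp only [block_eq_best]
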